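-- pv_equiv track=rewrite | github.com/nathraim/advent-of-code | 2020/day17/cubes.py | occupy_seats
-- ===== SOURCE A (Python) =====
-- def nb_adjacent_occ(seats,i,j):
--     nocc = 0
--     for k in [i-1,i,i+1]:
--         for l in [j-1,j,j+1]:
--             if  0 <= k < len(seats) and 0 <= l < len(seats[0]) and (k!=i or l!=j) and seats[k][l] == '#':
--                 nocc += 1
--     return nocc
--
-- def occupy_seats(seats,seats_new):
--     for i,row in enumerate(seats):
--         for j,seat in enumerate(row):
--             if seat == 'L' and nb_adjacent_occ(seats,i,j) == 0:
--                 seats_new[i][j]='#'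
--             elif seat == '#' and nb_adjacent_occ(seats,i,j) >= 4:
--                 seats_new[i][j]='L'
--     return seats_new
-- ===== SOURCE B (Python) =====
-- def occupy_seats(seats, seats_new):
--     # Separable neighbour counting: horizontal 3-window sums per row, then a
--     # vertical 3-row sum minus the centre, instead of a per-cell 3x3 pull loop.
--     # (Like A, mutates seats_new in place and returns it.)
--     R = len(seats)
--     occ = [[1 if cell == '#' else 0 for cell in row] for row in seats]
--     rsum = [[(row[j - 1] if 0 < j else 0) + row[j] + (row[j + 1] if j + 1 < len(row) else 0)
--              for j in range(len(row))] for row in occ]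
--     for i, row in enumerate(seats):
--         for j, seat in enumerate(row):
--             if seat != 'L' and seat != '#':
--                 continue
--             n = ((rsum[i - 1][j] if 0 < i else 0)
--                  + rsum[i][j]
--                  + (rsum[i + 1][j] if i + 1 < R else 0)
--                  - occ[i][j])
--             if seat == 'L':
--                 if n == 0:
--                     seats_new[i][j] = '#'
--             elif n >= 4:
--                 seats_new[i][j] = 'L'
--     return seats_new
-- ===== Notes on version B (the rewrite author's own statement) =====
-- stated objective: alternative
-- what changed: Replaces A's per-cell 3x3 pull loop (a bounds-checked double loop re-run for every seat) with separable neighbour counting: one pass builds an occupancy grid and horizontal 3-window row sums, then each cell's count is a vertical sum of three precomputed row sums minus the centre.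
-- outside the precondition, e.g. on occupy_seats([['L'], ['.', '#']], [['L'], ['.', '#']]): A returns [['#'], ['.', '#']], B raises IndexError
import Mathlib
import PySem

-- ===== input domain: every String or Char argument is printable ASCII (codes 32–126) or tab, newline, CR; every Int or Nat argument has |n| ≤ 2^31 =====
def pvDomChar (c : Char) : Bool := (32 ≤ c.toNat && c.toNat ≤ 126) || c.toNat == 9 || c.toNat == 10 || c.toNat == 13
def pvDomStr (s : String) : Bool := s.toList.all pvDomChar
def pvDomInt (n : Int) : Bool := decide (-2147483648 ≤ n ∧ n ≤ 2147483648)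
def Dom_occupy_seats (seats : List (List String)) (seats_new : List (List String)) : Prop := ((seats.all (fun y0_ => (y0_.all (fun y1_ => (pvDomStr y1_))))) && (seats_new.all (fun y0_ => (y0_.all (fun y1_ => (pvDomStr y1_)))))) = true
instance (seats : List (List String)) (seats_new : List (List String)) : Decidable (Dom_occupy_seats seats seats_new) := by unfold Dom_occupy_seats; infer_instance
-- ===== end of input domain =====

-- B replaces A's per-cell 3x3 pull loop by separable neighbour counting (horizontal
-- 3-window row sums, then a vertical 3-row sum minus the centre); equivalence is about
-- the return value (both Pythons mutate seats_new in place and return it).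


-- ===== PORT A =====
-- seats[k][l] == '#'; the bounds 0<=k<len(seats), 0<=l<len(seats[0]) are checked before
-- this in the source.  On ragged grids Python's seats[k][l] can raise IndexError —
-- those inputs are excluded by Pre_; there pyGet? is none and the test is false.
def cellHash (seats : List (List String)) (k l : Int) : Bool :=
  ((PySem.List.pyGet? seats k).bind (fun r => PySem.List.pyGet? r l)) == some "#"

def nb_adjacent_occ (seats : List (List String)) (i j : Int) : Int :=
  [i - 1, i, i + 1].foldl (fun nocc k =>
    [j - 1, j, j + 1].foldl (fun nocc l =>
      if 0 ≤ k ∧ k < (seats.length : Int) ∧ 0 ≤ l ∧ l < ((seats.headD []).length : Int)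
          ∧ (k ≠ i ∨ l ≠ j) ∧ cellHash seats k l = true
      then nocc + 1 else nocc) nocc) 0

-- seats_new[i][j] = v (in range under Pre_; Python raises IndexError otherwise)
def setCell (sn : List (List String)) (i j : Int) (v : String) : List (List String) :=
  PySem.List.pySetD sn i (PySem.List.pySetD (PySem.List.pyGetD sn i []) j v)

def occupy_seats (seats : List (List String)) (seats_new : List (List String)) : List (List String) :=
  (PySem.List.enumerate seats).foldl (fun sn p =>
    (PySem.List.enumerate p.2).foldl (fun sn q =>
      if q.2 = "L" ∧ nb_adjacent_occ seats p.1 q.1 = 0 then setCell sn p.1 q.1 "#"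
      else if q.2 = "#" ∧ 4 ≤ nb_adjacent_occ seats p.1 q.1 then setCell sn p.1 q.1 "L"
      else sn) sn) seats_new

-- ===== PORT B =====
-- occ = [[1 if cell == '#' else 0 for cell in row] for row in seats]
def occGrid (seats : List (List String)) : List (List Int) :=
  seats.map (fun row => row.map (fun cell => if cell = "#" then (1 : Int) else 0))

-- [(row[j-1] if 0 < j else 0) + row[j] + (row[j+1] if j+1 < len(row) else 0) for j in range(len(row))]
def rsumRow (row : List Int) : List Int :=
  (PySem.List.pyRange 0 row.length 1).map (fun j =>
    (if 0 < j then PySem.List.pyGetD row (j - 1) 0 else 0)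
    + PySem.List.pyGetD row j 0
    + (if j + 1 < (row.length : Int) then PySem.List.pyGetD row (j + 1) 0 else 0))

def rsumGrid (seats : List (List String)) : List (List Int) :=
  (occGrid seats).map rsumRow

def occupy_seats_alt (seats : List (List String)) (seats_new : List (List String)) : List (List String) :=
  (PySem.List.enumerate seats).foldl (fun sn p =>
    (PySem.List.enumerate p.2).foldl (fun sn q =>
      if q.2 ≠ "L" ∧ q.2 ≠ "#" then sn   -- continue
      else
        let n : Int :=
          (if 0 < p.1 then PySem.List.pyGetD (PySem.List.pyGetD (rsumGrid seats) (p.1 - 1) []) q.1 0 else 0)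
          + PySem.List.pyGetD (PySem.List.pyGetD (rsumGrid seats) p.1 []) q.1 0
          + (if p.1 + 1 < (seats.length : Int) then PySem.List.pyGetD (PySem.List.pyGetD (rsumGrid seats) (p.1 + 1) []) q.1 0 else 0)
          - PySem.List.pyGetD (PySem.List.pyGetD (occGrid seats) p.1 []) q.1 0
        if q.2 = "L" then (if n = 0 then setCell sn p.1 q.1 "#" else sn)
        else if 4 ≤ n then setCell sn p.1 q.1 "L" else sn) sn) seats_new

-- ===== PRECONDITION & SPEC =====
-- Pre_ excludes (a) non-rectangular seat grids that contain an 'L'/'#' cell, where A's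
-- column bound len(seats[0]) makes the behaviour accidental (A raises IndexError on most
-- of them and counts through an arbitrary column cut-off on the rest), and (b) inputs
-- where some 'L'/'#' cell of seats has no corresponding seats_new cell, where a write
-- seats_new[i][j] would raise IndexError.
def Pre_occupy_seats (seats : List (List String)) (seats_new : List (List String)) : Prop :=
  ((∃ row ∈ seats, ∃ c ∈ row, c = "L" ∨ c = "#") →
      ∀ row ∈ seats, row.length = (seats.headD []).length) ∧
  (∀ i < seats.length, ∀ j < (seats.getD i []).length,
      ((seats.getD i []).getD j "" = "L" ∨ (seats.getD i []).getD j "" = "#") →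
      i < seats_new.length ∧ j < (seats_new.getD i []).length)
instance (seats : List (List String)) (seats_new : List (List String)) : Decidable (Pre_occupy_seats seats seats_new) := by unfold Pre_occupy_seats; infer_instance

def pvWitness_occupy_seats : List (List String) × List (List String) :=
  ([["L", "."], [".", "#"]], [["L", "."], [".", "#"]])

def Spec_occupy_seats (seats : List (List String)) (seats_new : List (List String)) (out : List (List String)) : Prop := out = occupy_seats_alt seats seats_new
instance (seats : List (List String)) (seats_new : List (List String)) (out : List (List String)) : Decidable (Spec_occupy_seats seats seats_new out) := by unfold Spec_occupy_seats; infer_instance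

-- ===== CLAIM (what is proved, stated in full; the proofs are below) =====
def Claim_equal_occupy_seats : Prop := ∀ (seats : List (List String)) (seats_new : List (List String)), Dom_occupy_seats seats seats_new → Pre_occupy_seats seats seats_new → Spec_occupy_seats seats seats_new (occupy_seats seats seats_new)

-- ===== LEMMAS AND PROOFS =====

-- Indicator: in-bounds occupied cell (the common currency of both counting schemes).
def Ofun (seats : List (List String)) (a b : Int) : Int :=
  if 0 ≤ a ∧ a < (seats.length : Int) ∧ 0 ≤ b ∧ b < ((seats.headD []).length : Int)
      ∧ cellHash seats a b = true
  then 1 else 0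

lemma Ofun_row_oob (seats : List (List String)) (a b : Int)
    (h : a < 0 ∨ (seats.length : Int) ≤ a) : Ofun seats a b = 0 := by
  unfold Ofun; rw [if_neg]; rintro ⟨h1, h2, -⟩; omega

lemma Ofun_col_oob (seats : List (List String)) (a b : Int)
    (h : b < 0 ∨ ((seats.headD []).length : Int) ≤ b) : Ofun seats a b = 0 := by
  unfold Ofun; rw [if_neg]; rintro ⟨-, -, h1, h2, -⟩; omega

lemma step_off (seats : List (List String)) (i j k l : Int) (h : k ≠ i ∨ l ≠ j) (n : Int) :
    (if 0 ≤ k ∧ k < (seats.length : Int) ∧ 0 ≤ l ∧ l < ((seats.headD []).length : Int)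
        ∧ (k ≠ i ∨ l ≠ j) ∧ cellHash seats k l = true
     then n + 1 else n) = n + Ofun seats k l := by
  unfold Ofun
  by_cases h2 : 0 ≤ k ∧ k < (seats.length : Int) ∧ 0 ≤ l ∧ l < ((seats.headD []).length : Int)
      ∧ cellHash seats k l = true
  · rw [if_pos ⟨h2.1, h2.2.1, h2.2.2.1, h2.2.2.2.1, h, h2.2.2.2.2⟩, if_pos h2]
  · rw [if_neg (fun h1 => h2 ⟨h1.1, h1.2.1, h1.2.2.1, h1.2.2.2.1, h1.2.2.2.2.2⟩), if_neg h2]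
    omega

lemma step_center (seats : List (List String)) (i j : Int) (n : Int) :
    (if 0 ≤ i ∧ i < (seats.length : Int) ∧ 0 ≤ j ∧ j < ((seats.headD []).length : Int)
        ∧ (i ≠ i ∨ j ≠ j) ∧ cellHash seats i j = true
     then n + 1 else n) = n := by
  rw [if_neg]; rintro ⟨-, -, -, -, h, -⟩; rcases h with h | h <;> exact h rfl

-- A's pull count as a sum of eight indicator terms.
lemma nb_eq (seats : List (List String)) (i j : Int) :
    nb_adjacent_occ seats i j
      = Ofun seats (i - 1) (j - 1) + Ofun seats (i - 1) j + Ofun seats (i - 1) (j + 1)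
      + Ofun seats i (j - 1) + Ofun seats i (j + 1)
      + Ofun seats (i + 1) (j - 1) + Ofun seats (i + 1) j + Ofun seats (i + 1) (j + 1) := by
  unfold nb_adjacent_occ
  simp only [List.foldl_cons, List.foldl_nil]
  rw [step_off seats i j (i + 1) (j + 1) (Or.inl (by omega)),
      step_off seats i j (i + 1) j (Or.inl (by omega)),
      step_off seats i j (i + 1) (j - 1) (Or.inl (by omega)),
      step_off seats i j i (j + 1) (Or.inr (by omega)),
      step_center seats i j,
      step_off seats i j i (j - 1) (Or.inr (by omega)),
      step_off seats i j (i - 1) (j + 1) (Or.inl (by omega)),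
      step_off seats i j (i - 1) j (Or.inl (by omega)),
      step_off seats i j (i - 1) (j - 1) (Or.inl (by omega))]
  ring

-- the occ row at an in-range row index
lemma occ_row (seats : List (List String)) (a : Nat) (ha : a < seats.length) :
    (occGrid seats).getD a [] = seats[a].map (fun cell => if cell = "#" then (1 : Int) else 0) := by
  unfold occGrid
  rw [List.getD_eq_getElem _ _ (by simpa using ha), List.getElem_map]

lemma cellHash_in (seats : List (List String)) (a b : Nat) (ha : a < seats.length)
    (hb : b < seats[a].length) :
    cellHash seats (a : Int) (b : Int) = (seats[a][b] = "#" : Bool) := by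
  unfold cellHash
  rw [PySem.List.pyGet?_natCast, List.getElem?_eq_getElem ha]
  simp only [Option.bind_some, PySem.List.pyGet?_natCast, List.getElem?_eq_getElem hb]
  by_cases hc : seats[a][b] = "#" <;> simp [hc]

-- occ lookup at a nonnegative column index (in or out of range) is the indicator
lemma occ_lookup (seats : List (List String))
    (hrect : ∀ row ∈ seats, row.length = (seats.headD []).length)
    (a : Nat) (ha : a < seats.length) (t : Int) (ht : 0 ≤ t) :
    PySem.List.pyGetD ((occGrid seats).getD a []) t 0 = Ofun seats (a : Int) t := by
  have hlen : seats[a].length = (seats.headD []).length := hrect _ (List.getElem_mem ha)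
  obtain ⟨b, rfl⟩ : ∃ b : Nat, t = (b : Int) := ⟨t.toNat, by omega⟩
  rw [occ_row seats a ha, PySem.List.pyGetD_natCast]
  by_cases hb : b < seats[a].length
  · rw [List.getD_eq_getElem _ _ (by simpa using hb), List.getElem_map]
    unfold Ofun
    rw [cellHash_in seats a b ha hb]
    by_cases hc : seats[a][b] = "#"
    · rw [if_pos hc, if_pos ⟨by omega, by omega, by omega, by omega, by simp [hc]⟩]
    · rw [if_neg hc, if_neg (fun hcon => hc (by simpa using hcon.2.2.2.2))]
  · rw [List.getD_eq_default _ _ (by simpa using hb),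
        Ofun_col_oob seats _ _ (Or.inr (by omega))]

-- rsum lookup: the horizontal 3-window sum as three indicators
lemma rsum_lookup (seats : List (List String))
    (hrect : ∀ row ∈ seats, row.length = (seats.headD []).length)
    (a b : Nat) (ha : a < seats.length) (hb : b < (seats.headD []).length) :
    PySem.List.pyGetD ((rsumGrid seats).getD a []) (b : Int) 0
      = Ofun seats (a : Int) ((b : Int) - 1) + Ofun seats (a : Int) (b : Int)
        + Ofun seats (a : Int) ((b : Int) + 1) := by
  have hlen : ((occGrid seats).getD a []).length = (seats.headD []).length := by
    rw [occ_row seats a ha, List.length_map]; exact hrect _ (List.getElem_mem ha)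
  have hg : (rsumGrid seats).getD a [] = rsumRow ((occGrid seats).getD a []) := by
    have h2 : a < (occGrid seats).length := by simpa [occGrid] using ha
    unfold rsumGrid
    rw [List.getD_eq_getElem _ _ (by simpa using h2), List.getElem_map,
        List.getD_eq_getElem _ _ h2]
  rw [hg]
  unfold rsumRow
  rw [PySem.List.pyGetD_map_pyRange _ _ _ _ (by omega : b < ((occGrid seats).getD a []).length)]
  · congr 1
    · congr 1
      · by_cases h0 : (0 : Int) < (b : Int)
        · rw [if_pos h0, occ_lookup seats hrect a ha _ (by omega)]
        · rw [if_neg h0, Ofun_col_oob seats _ _ (Or.inl (by omega))]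
      · exact occ_lookup seats hrect a ha _ (by omega)
    · by_cases h1 : (b : Int) + 1 < (((occGrid seats).getD a []).length : Int)
      · rw [if_pos h1, occ_lookup seats hrect a ha _ (by omega)]
      · rw [if_neg h1, Ofun_col_oob seats _ _ (Or.inr (by omega))]

-- The per-cell equality: B's separable count = A's pull count.
lemma n_eq (seats : List (List String))
    (hrect : ∀ row ∈ seats, row.length = (seats.headD []).length)
    (i j : Nat) (hi : i < seats.length) (hj : j < (seats.headD []).length) :
    (if 0 < (i : Int) then PySem.List.pyGetD (PySem.List.pyGetD (rsumGrid seats) ((i : Int) - 1) []) (j : Int) 0 else 0)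
    + PySem.List.pyGetD (PySem.List.pyGetD (rsumGrid seats) (i : Int) []) (j : Int) 0
    + (if (i : Int) + 1 < (seats.length : Int) then PySem.List.pyGetD (PySem.List.pyGetD (rsumGrid seats) ((i : Int) + 1) []) (j : Int) 0 else 0)
    - PySem.List.pyGetD (PySem.List.pyGetD (occGrid seats) (i : Int) []) (j : Int) 0
    = nb_adjacent_occ seats (i : Int) (j : Int) := by
  rw [nb_eq]
  rw [PySem.List.pyGetD_natCast (occGrid seats), occ_lookup seats hrect i hi _ (by omega)]
  rw [PySem.List.pyGetD_natCast (rsumGrid seats), rsum_lookup seats hrect i j hi hj]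
  have hmid : Ofun seats (i : Int) ((j : Int) - 1) + Ofun seats (i : Int) (j : Int)
      + Ofun seats (i : Int) ((j : Int) + 1) - Ofun seats (i : Int) (j : Int)
      = Ofun seats (i : Int) ((j : Int) - 1) + Ofun seats (i : Int) ((j : Int) + 1) := by ring
  by_cases h0 : 0 < (i : Int)
  · rw [if_pos h0]
    have e1 : (i : Int) - 1 = ((i - 1 : Nat) : Int) := by omega
    rw [e1, PySem.List.pyGetD_natCast (rsumGrid seats),
        rsum_lookup seats hrect (i - 1) j (by omega) hj]
    by_cases h2 : (i : Int) + 1 < (seats.length : Int)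
    · rw [if_pos h2]
      have e2 : (i : Int) + 1 = ((i + 1 : Nat) : Int) := by omega
      rw [e2, PySem.List.pyGetD_natCast (rsumGrid seats),
          rsum_lookup seats hrect (i + 1) j (by omega) hj]
      rw [← e1, ← e2]
      ring
    · rw [if_neg h2, ← e1,
          Ofun_row_oob seats ((i : Int) + 1) ((j : Int) - 1) (Or.inr (by omega)),
          Ofun_row_oob seats ((i : Int) + 1) (j : Int) (Or.inr (by omega)),
          Ofun_row_oob seats ((i : Int) + 1) ((j : Int) + 1) (Or.inr (by omega))]
      ring
  · rw [if_neg h0]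
    have hi0 : (i : Int) = 0 := by omega
    rw [Ofun_row_oob seats ((i : Int) - 1) ((j : Int) - 1) (Or.inl (by omega)),
        Ofun_row_oob seats ((i : Int) - 1) (j : Int) (Or.inl (by omega)),
        Ofun_row_oob seats ((i : Int) - 1) ((j : Int) + 1) (Or.inl (by omega))]
    by_cases h2 : (i : Int) + 1 < (seats.length : Int)
    · rw [if_pos h2]
      have e2 : (i : Int) + 1 = ((i + 1 : Nat) : Int) := by omega
      rw [e2, PySem.List.pyGetD_natCast (rsumGrid seats),
          rsum_lookup seats hrect (i + 1) j (by omega) hj, ← e2]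
      ring
    · rw [if_neg h2,
          Ofun_row_oob seats ((i : Int) + 1) ((j : Int) - 1) (Or.inr (by omega)),
          Ofun_row_oob seats ((i : Int) + 1) (j : Int) (Or.inr (by omega)),
          Ofun_row_oob seats ((i : Int) + 1) ((j : Int) + 1) (Or.inr (by omega))]
      ring

-- ===== VERDICT (by name: the statement is the Claim_ definition above) =====
theorem occupy_seats_spec : Claim_equal_occupy_seats := by
  intro seats seats_new _hdom hpre
  unfold Spec_occupy_seats occupy_seats occupy_seats_alt
  refine PySem.List.foldl_congr_mem _ _ _ _ ?_
  intro sn p hp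
  obtain ⟨i, hi, rfl⟩ := (PySem.List.mem_enumerate_iff _ _ _).mp hp
  simp only [zero_add]
  refine PySem.List.foldl_congr_mem _ _ _ _ ?_
  intro sn' q hq
  obtain ⟨j, hj, rfl⟩ := (PySem.List.mem_enumerate_iff _ _ _).mp hq
  simp only [zero_add]
  by_cases hL : seats[i][j] = "L"
  · have hrect := hpre.1 ⟨seats[i], List.getElem_mem hi, seats[i][j], List.getElem_mem hj, Or.inl hL⟩
    have hjC : j < (seats.headD []).length := by
      have := hrect seats[i] (List.getElem_mem hi); omega
    have hn := n_eq seats hrect i j hi hjC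
    simp only [hL, hn]
    simp
  · by_cases hH : seats[i][j] = "#"
    · have hrect := hpre.1 ⟨seats[i], List.getElem_mem hi, seats[i][j], List.getElem_mem hj, Or.inr hH⟩
      have hjC : j < (seats.headD []).length := by
        have := hrect seats[i] (List.getElem_mem hi); omega
      have hn := n_eq seats hrect i j hi hjC
      simp only [hH, hn]
      simp
    · simp [hL, hH]
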